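-- pv_equiv track=rewrite | github.com/DigitalVigilantes/Hacking | Multiplicaçao de matrizes.py | calcular_valor_matriz_c
-- ===== SOURCE A (Python) =====
-- def calcular_valor_matriz_c(N, P, Q, R, S, X, Y, I, J):
--     A = [[(P * i + Q * j) % X for j in range(N)] for i in range(N)]
--     B = [[(R * i + S * j) % Y for j in range(N)] for i in range(N)]
--     C = [[0] * N for _ in range(N)]
--
--     for i in range(N):
--         for j in range(N):
--             for k in range(N):
--                 C[i][j] += A[i][k] * B[k][j]
--
--     return C[I-1][J-1]
-- ===== SOURCE B (Python) =====
-- def calcular_valor_matriz_c(N, P, Q, R, S, X, Y, I, J):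
--     # Only the one requested entry is needed: C[I-1][J-1] = sum_k A[I-1][k] * B[k][J-1].
--     # Python's negative list indexing on a length-N list is index % N for -N <= t < N.
--     i = (I - 1) % N
--     j = (J - 1) % N
--     total = 0
--     for k in range(N):
--         total += ((P * i + Q * k) % X) * ((R * k + S * j) % Y)
--     return total
-- ===== Notes on version B (the rewrite author's own statement) =====
-- stated objective: faster
-- what changed: B skips building the three N x N matrices and computes only the single requested entry as one O(N) dot product, mapping the (possibly negative) indices I-1, J-1 directly with % N; intended as faster (O(N) vs O(N^3)); measured ~1061x at N=64, A timed out at N=256 where B returned.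
import Mathlib
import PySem

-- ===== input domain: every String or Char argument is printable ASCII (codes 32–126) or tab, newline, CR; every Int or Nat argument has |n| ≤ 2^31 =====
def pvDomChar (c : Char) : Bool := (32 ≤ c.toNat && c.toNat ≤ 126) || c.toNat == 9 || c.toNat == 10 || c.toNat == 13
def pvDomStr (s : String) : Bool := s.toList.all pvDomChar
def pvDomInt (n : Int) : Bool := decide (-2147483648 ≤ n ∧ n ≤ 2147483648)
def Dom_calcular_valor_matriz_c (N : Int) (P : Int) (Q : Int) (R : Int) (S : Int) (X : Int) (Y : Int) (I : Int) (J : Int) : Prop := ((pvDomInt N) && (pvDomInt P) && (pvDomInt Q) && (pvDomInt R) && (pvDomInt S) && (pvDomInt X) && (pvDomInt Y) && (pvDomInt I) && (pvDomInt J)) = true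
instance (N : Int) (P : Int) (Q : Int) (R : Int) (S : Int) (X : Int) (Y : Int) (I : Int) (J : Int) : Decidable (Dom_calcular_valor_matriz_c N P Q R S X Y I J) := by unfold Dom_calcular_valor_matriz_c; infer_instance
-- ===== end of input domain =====

-- B computes only the requested entry C[I-1][J-1] as a single O(N) dot product instead of building all three N×N matrices; intended as faster: measured ~1061× at N=64, A timed out at N=256 where B returned.


-- ===== PORT A =====
-- literal transliteration: build A, B, a zero matrix C ([0]*N = replicate N.toNat 0, exact
-- since Python gives [] for N ≤ 0), run the triple nested loop with Python's index
-- semantics (pyGetD/pySetD; loop indices from range are in range, so the defaults never fire),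
-- then read C[I-1][J-1] (pyGetD, total form of the indexing that Pre_ keeps in range).
def calcular_valor_matriz_c (N : Int) (P : Int) (Q : Int) (R : Int) (S : Int) (X : Int) (Y : Int) (I : Int) (J : Int) : Int :=
  let A := (PySem.List.pyRange 0 N 1).map (fun i => (PySem.List.pyRange 0 N 1).map (fun j => PySem.Int.mod (P * i + Q * j) X))
  let B := (PySem.List.pyRange 0 N 1).map (fun i => (PySem.List.pyRange 0 N 1).map (fun j => PySem.Int.mod (R * i + S * j) Y))
  let C0 := (PySem.List.pyRange 0 N 1).map (fun _ => List.replicate N.toNat (0 : Int))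
  let C := (PySem.List.pyRange 0 N 1).foldl (fun C i =>
    (PySem.List.pyRange 0 N 1).foldl (fun C j =>
      (PySem.List.pyRange 0 N 1).foldl (fun C k =>
        PySem.List.pySetD C i (PySem.List.pySetD (PySem.List.pyGetD C i []) j
          (PySem.List.pyGetD (PySem.List.pyGetD C i []) j 0 +
            PySem.List.pyGetD (PySem.List.pyGetD A i []) k 0 *
            PySem.List.pyGetD (PySem.List.pyGetD B k []) j 0))) C) C) C0
  PySem.List.pyGetD (PySem.List.pyGetD C (I - 1) []) (J - 1) 0

-- ===== PORT B =====
def calcular_valor_matriz_c_alt (N : Int) (P : Int) (Q : Int) (R : Int) (S : Int) (X : Int) (Y : Int) (I : Int) (J : Int) : Int :=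
  let i := PySem.Int.mod (I - 1) N
  let j := PySem.Int.mod (J - 1) N
  (PySem.List.pyRange 0 N 1).foldl
    (fun total k => total + PySem.Int.mod (P * i + Q * k) X * PySem.Int.mod (R * k + S * j) Y) 0

-- ===== PRECONDITION & SPEC =====
-- Pre_ is exactly where A returns: N ≥ 1 (N ≤ 0 gives C = [] and C[I-1] raises IndexError),
-- X ≠ 0 and Y ≠ 0 (else % raises ZeroDivisionError), and I-1, J-1 legal Python indices.
def Pre_calcular_valor_matriz_c (N : Int) (P : Int) (Q : Int) (R : Int) (S : Int) (X : Int) (Y : Int) (I : Int) (J : Int) : Prop :=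
  1 ≤ N ∧ X ≠ 0 ∧ Y ≠ 0 ∧ -N ≤ I - 1 ∧ I - 1 < N ∧ -N ≤ J - 1 ∧ J - 1 < N
instance (N : Int) (P : Int) (Q : Int) (R : Int) (S : Int) (X : Int) (Y : Int) (I : Int) (J : Int) : Decidable (Pre_calcular_valor_matriz_c N P Q R S X Y I J) := by unfold Pre_calcular_valor_matriz_c; infer_instance
def pvWitness_calcular_valor_matriz_c : Int × Int × Int × Int × Int × Int × Int × Int × Int := (2, 1, 1, 1, 1, 3, 3, 1, 2)
def Spec_calcular_valor_matriz_c (N : Int) (P : Int) (Q : Int) (R : Int) (S : Int) (X : Int) (Y : Int) (I : Int) (J : Int) (out : Int) : Prop := out = calcular_valor_matriz_c_alt N P Q R S X Y I J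
instance (N : Int) (P : Int) (Q : Int) (R : Int) (S : Int) (X : Int) (Y : Int) (I : Int) (J : Int) (out : Int) : Decidable (Spec_calcular_valor_matriz_c N P Q R S X Y I J out) := by unfold Spec_calcular_valor_matriz_c; infer_instance

-- ===== CLAIM (what is proved, stated in full; the proofs are below) =====
def Claim_equal_calcular_valor_matriz_c : Prop := ∀ (N : Int) (P : Int) (Q : Int) (R : Int) (S : Int) (X : Int) (Y : Int) (I : Int) (J : Int), Dom_calcular_valor_matriz_c N P Q R S X Y I J → Pre_calcular_valor_matriz_c N P Q R S X Y I J → Spec_calcular_valor_matriz_c N P Q R S X Y I J (calcular_valor_matriz_c N P Q R S X Y I J)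

-- ===== LEMMAS AND PROOFS =====
-- running-sum shift
theorem pv_foldl_add (g : Nat → Int) : ∀ (l : List Nat) (c : Int),
    l.foldl (fun s k => s + g k) c = c + l.foldl (fun s k => s + g k) 0 := by
  intro l
  induction l with
  | nil => intro c; simp
  | cons k l ih => intro c; simp only [List.foldl_cons]; rw [ih (c + g k), ih (0 + g k)]; ring

-- a fold of per-index writes over range m rewrites the first m entries pointwise
theorem pv_setfold {α : Type} (d : α) (F : Nat → α → α) (s : List α → Nat → List α)
    (hs : ∀ (r : List α) (i : Nat), i < r.length → s r i = r.set i (F i (r.getD i d))) :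
    ∀ (m : Nat) (r : List α), m ≤ r.length →
    (List.range m).foldl s r = (List.range m).map (fun i => F i (r.getD i d)) ++ r.drop m := by
  intro m
  induction m with
  | zero => intro r _; simp
  | succ m ih =>
    intro r hm
    rw [List.range_succ, List.foldl_append, List.foldl_cons, List.foldl_nil, ih r (by omega)]
    have hl : m < ((List.range m).map (fun i => F i (r.getD i d)) ++ r.drop m).length := by
      rw [List.length_append, List.length_map, List.length_range, List.length_drop]; omega
    rw [hs _ m hl]
    have hdrop : r.drop m = r[m] :: r.drop (m + 1) := List.drop_eq_getElem_cons (by omega)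
    have hget : ((List.range m).map (fun i => F i (r.getD i d)) ++ r.drop m).getD m d = r[m] := by
      rw [List.getD_eq_getElem _ _ hl, List.getElem_append_right (by simp)]
      simp
      rfl
    rw [hget, hdrop]
    rw [List.set_append_right _ _ (by simp)]
    simp
    rw [hdrop, List.set_cons_zero]
    simp [List.getElem?_eq_getElem (show m < r.length by omega)]
    rfl


-- invariant-carrying fold congruence
theorem pv_foldl_congr_inv {α β : Type} (P : β → Prop) (f g : β → α → β) :
    ∀ (l : List α) (a : β), P a → (∀ b x, P b → x ∈ l → P (g b x)) →
    (∀ b x, P b → x ∈ l → f b x = g b x) → l.foldl f a = l.foldl g a := by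
  intro l
  induction l with
  | nil => intro a _ _ _; rfl
  | cons x l ih =>
    intro a hPa hpres hfg
    simp only [List.foldl_cons]
    rw [hfg a x hPa (by simp)]
    exact ih (g a x) (hpres a x hPa (by simp))
      (fun b y hb hy => hpres b y hb (by simp [hy]))
      (fun b y hb hy => hfg b y hb (by simp [hy]))

-- a fold whose step only rewrites the i-th entry commutes with reading the i-th entry
theorem pv_setlocal {ρ β : Type} (dr : ρ) (i : Nat) (t : ρ → β → ρ) :
    ∀ (l : List β) (C : List ρ), i < C.length →
    l.foldl (fun C x => C.set i (t (C.getD i dr) x)) C = C.set i (l.foldl t (C.getD i dr)) := by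
  intro l
  induction l with
  | nil =>
    intro C hi
    rw [List.foldl_nil, List.foldl_nil, List.getD_eq_getElem _ _ hi, List.set_getElem_self]
  | cons x l ih =>
    intro C hi
    simp only [List.foldl_cons]
    rw [ih _ (by simpa using hi)]
    rw [show (C.set i (t (C.getD i dr) x)).getD i dr = t (C.getD i dr) x by
      rw [List.getD_eq_getElem _ _ (by simpa using hi), List.getElem_set_self]]
    rw [List.set_set]

-- the k-loop on a single row collapses to one addition of the running sum
theorem pv_rowfold (g : Nat → Int) (j : Nat) :
    ∀ (l : List Nat) (r : List Int), j < r.length →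
    l.foldl (fun r k => r.set j (r.getD j 0 + g k)) r
      = r.set j (r.getD j 0 + l.foldl (fun s k => s + g k) 0) := by
  intro l
  induction l with
  | nil =>
    intro r hj
    rw [List.foldl_nil, List.foldl_nil, add_zero, List.getD_eq_getElem _ _ hj,
      List.set_getElem_self]
  | cons k l ih =>
    intro r hj
    simp only [List.foldl_cons]
    rw [ih _ (by simpa using hj)]
    rw [show (r.set j (r.getD j 0 + g k)).getD j 0 = r.getD j 0 + g k by
      rw [List.getD_eq_getElem _ _ (by simpa using hj), List.getElem_set_self]]
    rw [List.set_set, pv_foldl_add, pv_foldl_add g l (0 + g k)]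
    ring_nf

theorem pv_foldl_length {α β : Type} (f : List α → β → List α)
    (hf : ∀ r x, (f r x).length = r.length) :
    ∀ (l : List β) (r : List α), (l.foldl f r).length = r.length := by
  intro l
  induction l with
  | nil => intro r; rfl
  | cons x l ih => intro r; rw [List.foldl_cons, ih, hf]

def pvSum (n : Nat) (f : Nat → Int) : Int := (List.range n).foldl (fun s k => s + f k) 0

def pvAm (n : Nat) (P Q X : Int) : List (List Int) :=
  (List.range n).map (fun i => (List.range n).map (fun j => PySem.Int.mod (P * ↑i + Q * ↑j) X))

def pvStep (n : Nat) (AM BM : List (List Int)) (C : List (List Int)) (i : Nat) : List (List Int) :=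
  (List.range n).foldl (fun C j =>
    (List.range n).foldl (fun C k =>
      C.set i ((C.getD i []).set j ((C.getD i []).getD j 0 +
        (AM.getD i []).getD k 0 * (BM.getD k []).getD j 0))) C) C

def pvM (n : Nat) (AM BM : List (List Int)) : List (List Int) :=
  (List.range n).foldl (pvStep n AM BM) ((List.range n).map (fun _ => List.replicate n (0 : Int)))

def pvW (n : Nat) (AM BM : List (List Int)) (i : Nat) (r : List Int) : List Int :=
  (List.range n).foldl (fun r j => r.set j (r.getD j 0 +
    pvSum n (fun k => (AM.getD i []).getD k 0 * (BM.getD k []).getD j 0))) r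

theorem pv_getD_replicate (n j : Nat) : (List.replicate n (0 : Int)).getD j 0 = 0 := by
  rcases Nat.lt_or_ge j n with h | h
  · rw [List.getD_eq_getElem _ _ (by simpa using h)]
    simp
  · rw [List.getD_eq_getElem?_getD, List.getElem?_eq_none (by simpa using h)]
    rfl

-- the triple loop computes, in every cell, the dot product of row i of AM with column j of BM
theorem pvM_eq (n : Nat) (AM BM : List (List Int)) :
    pvM n AM BM = (List.range n).map (fun i => (List.range n).map (fun j =>
      0 + pvSum n (fun k => (AM.getD i []).getD k 0 * (BM.getD k []).getD j 0))) := by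
  unfold pvM
  have h1 : (List.range n).foldl (pvStep n AM BM)
        ((List.range n).map (fun _ => List.replicate n (0 : Int)))
      = (List.range n).foldl (fun C i => C.set i (pvW n AM BM i (C.getD i [])))
        ((List.range n).map (fun _ => List.replicate n (0 : Int))) := by
    apply pv_foldl_congr_inv (fun C => C.length = n ∧ ∀ r ∈ C, r.length = n)
    · constructor
      · simp
      · intro r hr
        rcases List.mem_map.mp hr with ⟨_, _, rfl⟩
        simp
    · rintro C i ⟨hlen, hrows⟩ hmem
      have hin : i < n := List.mem_range.mp hmem
      constructor
      · simpa using hlen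
      · intro r hr
        rcases List.mem_or_eq_of_mem_set hr with h | rfl
        · exact hrows r h
        · rw [pvW, pv_foldl_length _ (fun r x => by simp)]
          exact hrows _ (by
            rw [List.getD_eq_getElem _ _ (by omega)]
            exact List.getElem_mem _)
    · rintro C i ⟨hlen, hrows⟩ hi
      have hin : i < n := List.mem_range.mp hi
      have hiC : i < C.length := by omega
      unfold pvStep
      have hj1 := pv_foldl_congr_inv (fun C : List (List Int) => i < C.length)
        (fun C j => (List.range n).foldl (fun C k =>
          C.set i ((C.getD i []).set j ((C.getD i []).getD j 0 +
            (AM.getD i []).getD k 0 * (BM.getD k []).getD j 0))) C)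
        (fun C j => C.set i ((List.range n).foldl (fun r k =>
          r.set j (r.getD j 0 + (AM.getD i []).getD k 0 * (BM.getD k []).getD j 0)) (C.getD i [])))
        (List.range n) C hiC
        (fun b x hb _ => by simpa using hb)
        (fun b x hb _ => pv_setlocal [] i
          (fun r k => r.set x (r.getD x 0 + (AM.getD i []).getD k 0 * (BM.getD k []).getD x 0))
          (List.range n) b hb)
      rw [hj1]
      rw [pv_setlocal [] i
        (fun r j => (List.range n).foldl (fun r k =>
          r.set j (r.getD j 0 + (AM.getD i []).getD k 0 * (BM.getD k []).getD j 0)) r)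
        (List.range n) C hiC]
      congr 1
      have hrowlen : (C.getD i []).length = n := by
        apply hrows
        rw [List.getD_eq_getElem _ _ hiC]
        exact List.getElem_mem _
      unfold pvW
      apply pv_foldl_congr_inv (fun r : List Int => r.length = n)
      · exact hrowlen
      · intro r j hr _
        simpa using hr
      · intro r j hr hj
        exact pv_rowfold _ j (List.range n) r (by rw [hr]; exact List.mem_range.mp hj)
  rw [h1]
  rw [pv_setfold [] (pvW n AM BM) (fun C i => C.set i (pvW n AM BM i (C.getD i [])))
    (fun r i _ => rfl) n _ (by simp)]
  rw [List.drop_of_length_le (by simp), List.append_nil]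
  apply List.map_congr_left
  intro i hi
  have hin : i < n := List.mem_range.mp hi
  rw [PySem.List.getD_map_range _ n i _ hin]
  rw [pvW]
  rw [pv_setfold (0 : Int)
    (fun j x => x + pvSum n (fun k => (AM.getD i []).getD k 0 * (BM.getD k []).getD j 0))
    (fun r j => r.set j (r.getD j 0 + pvSum n (fun k => (AM.getD i []).getD k 0 * (BM.getD k []).getD j 0)))
    (fun r j _ => rfl) n _ (by simp)]
  rw [List.drop_of_length_le (by simp), List.append_nil]
  apply List.map_congr_left
  intro j _
  rw [pv_getD_replicate]

-- Python's xs[t] for -n ≤ t < n, n = len(xs), is xs[t % n]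
theorem pv_pyGetD_mod {α : Type} (xs : List α) (t : Int) (d : α) (n : Nat)
    (hlen : xs.length = n) (hn : 0 < n) (h1 : -(n:Int) ≤ t) (h2 : t < n) :
    PySem.List.pyGetD xs t d = xs.getD (t % (n:Int)).toNat d := by
  by_cases h : 0 ≤ t
  · rw [PySem.List.pyGetD_eq_getElem xs d h (by rw [hlen]; exact_mod_cast h2)]
    rw [Int.emod_eq_of_lt h h2]
    rw [List.getD_eq_getElem _ _ (by omega)]
  · have hmod : t % (n:Int) = t + n := by
      have h3 := Int.add_mul_emod_self_left t ((n:Int)) 1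
      rw [mul_one] at h3
      rw [← h3, Int.emod_eq_of_lt (by omega) (by omega)]
    have hidx : (t % (n:Int)).toNat = n - (-t).toNat := by omega
    have hk : t = -(((-t).toNat : Nat) : Int) := by omega
    rw [hidx]
    conv_lhs => rw [hk]
    rw [PySem.List.pyGetD_neg_natCast xs _ d (by omega) (by omega)]
    rw [List.getD_eq_getElem _ _ (by omega)]
    congr 1
    omega

-- ===== VERDICT (by name: the statement is the Claim_ definition above) =====
theorem calcular_valor_matriz_c_spec : Claim_equal_calcular_valor_matriz_c := by
  intro N P Q R S X Y I J _ hpre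
  obtain ⟨hN, hX, hY, hI1, hI2, hJ1, hJ2⟩ := hpre
  unfold Spec_calcular_valor_matriz_c
  set n := N.toNat with hn
  have hNn : N = (n : Int) := by omega
  have hnpos : 0 < n := by omega
  -- port A in Nat-indexed normal form
  have hAport : calcular_valor_matriz_c N P Q R S X Y I J =
      PySem.List.pyGetD (PySem.List.pyGetD (pvM n (pvAm n P Q X) (pvAm n R S Y)) (I-1) [])
        (J-1) 0 := by
    rw [calcular_valor_matriz_c, hNn]
    simp only [PySem.List.pyRange_zero_natCast, List.foldl_map, List.map_map,
      PySem.List.pySetD_natCast, PySem.List.pyGetD_natCast, Int.toNat_natCast]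
    rfl
  -- port B in Nat-indexed normal form
  have hAlt : calcular_valor_matriz_c_alt N P Q R S X Y I J =
      pvSum n (fun k => PySem.Int.mod (P * PySem.Int.mod (I-1) ((n:Int)) + Q * ↑k) X *
        PySem.Int.mod (R * ↑k + S * PySem.Int.mod (J-1) ((n:Int))) Y) := by
    rw [calcular_valor_matriz_c_alt, hNn]
    simp only [PySem.List.pyRange_zero_natCast, List.foldl_map]
    rfl
  rw [hAport, hAlt, pvM_eq]
  have hImod : PySem.Int.mod (I-1) ((n:Int)) = (I-1) % (n:Int) :=
    PySem.Int.mod_eq_emod_of_pos (by omega)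
  have hJmod : PySem.Int.mod (J-1) ((n:Int)) = (J-1) % (n:Int) :=
    PySem.Int.mod_eq_emod_of_pos (by omega)
  have hIb : 0 ≤ (I-1) % (n:Int) ∧ (I-1) % (n:Int) < n :=
    ⟨Int.emod_nonneg _ (by omega), Int.emod_lt_of_pos _ (by omega)⟩
  have hJb : 0 ≤ (J-1) % (n:Int) ∧ (J-1) % (n:Int) < n :=
    ⟨Int.emod_nonneg _ (by omega), Int.emod_lt_of_pos _ (by omega)⟩
  have hi'n : ((I-1) % (n:Int)).toNat < n := by omega
  have hj'n : ((J-1) % (n:Int)).toNat < n := by omega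
  rw [pv_pyGetD_mod _ (I-1) [] n (by simp) hnpos (by omega) (by omega)]
  rw [PySem.List.getD_map_range _ n _ _ hi'n]
  rw [pv_pyGetD_mod _ (J-1) 0 n (by simp) hnpos (by omega) (by omega)]
  rw [PySem.List.getD_map_range _ n _ _ hj'n]
  rw [hImod, hJmod, zero_add]
  set i' := ((I-1) % (n:Int)).toNat with hi'
  set j' := ((J-1) % (n:Int)).toNat with hj'
  rw [show (I-1) % (n:Int) = ((i' : Nat) : Int) by omega]
  rw [show (J-1) % (n:Int) = ((j' : Nat) : Int) by omega]
  unfold pvSum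
  apply PySem.List.foldl_congr_mem
  intro acc k hk
  beta_reduce
  have hkn : k < n := List.mem_range.mp hk
  unfold pvAm
  rw [PySem.List.getD_map_range _ n i' _ (by omega)]
  rw [PySem.List.getD_map_range _ n k _ hkn]
  rw [PySem.List.getD_map_range _ n k _ hkn]
  rw [PySem.List.getD_map_range _ n j' _ (by omega)]
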